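-- pv_equiv track=rewrite | github.com/NetRxn/SK_EFT_Hawking | src/fracton/information_retention.py | _z3_wilson_loops
-- ===== SOURCE A (Python) =====
-- def _z3_wilson_loops(link_config: tuple[int, ...], group_order: int) -> tuple[int, ...]:
--     """Compute all independent Wilson loop values for a periodic 1D chain.
--
--     On a 1D periodic chain with L links, the independent Wilson loops are
--     contiguous products of link variables:
--         W_k = prod_{i=0}^{k-1} U_i  (mod group_order), for k = 1, ..., L
--
--     The full Wilson loop W_L (around the entire chain) is the only
--     topologically non-trivial loop and uniquely characterizes the
--     gauge-invariant content in 1D.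
--
--     For the coarse-graining analysis, we track all partial Wilson loops
--     since they encode the spatial distribution of gauge flux.
--
--     Args:
--         link_config: Tuple of link variables (each in {0, 1, ..., group_order-1})
--         group_order: Order of the cyclic gauge group
--
--     Returns:
--         Tuple of Wilson loop values (partial products mod group_order)
--     """
--     L = len(link_config)
--     loops = []
--     for k in range(1, L + 1):
--         w = 0
--         for i in range(k):
--             w = (w + link_config[i]) % group_order
--         loops.append(w)
--     return tuple(loops)
-- ===== SOURCE B (Python) =====
-- def _z3_wilson_loops(link_config: tuple[int, ...], group_order: int) -> tuple[int, ...]: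
--     """One pass: maintain the running cumulative sum mod group_order."""
--     loops = []
--     w = 0
--     for u in link_config:
--         w = (w + u) % group_order
--         loops.append(w)
--     return tuple(loops)
-- ===== Notes on version B (the rewrite author's own statement) =====
-- stated objective: faster
-- what changed: Replaced the nested loop that recomputes each prefix sum from scratch by a single pass maintaining the running cumulative sum mod group_order.
import Mathlib
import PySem

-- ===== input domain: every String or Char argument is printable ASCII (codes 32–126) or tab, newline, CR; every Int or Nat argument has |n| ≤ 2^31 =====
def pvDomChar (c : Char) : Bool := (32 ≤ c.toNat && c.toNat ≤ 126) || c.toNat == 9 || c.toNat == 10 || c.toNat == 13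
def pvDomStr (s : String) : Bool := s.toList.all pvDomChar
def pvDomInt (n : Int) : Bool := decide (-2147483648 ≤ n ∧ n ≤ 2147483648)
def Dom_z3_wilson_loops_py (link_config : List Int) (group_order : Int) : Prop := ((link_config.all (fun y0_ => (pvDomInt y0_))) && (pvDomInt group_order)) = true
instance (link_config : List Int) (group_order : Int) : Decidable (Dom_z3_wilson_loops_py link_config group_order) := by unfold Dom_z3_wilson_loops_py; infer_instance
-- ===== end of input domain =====

-- B replaces A's O(L^2) nested recomputation of every prefix sum by one pass
-- maintaining the running cumulative sum mod group_order (faster, asymptotic).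

-- ===== PORT A =====
-- literal transliteration: for k in range(1, L+1): w = 0; for i in range(k): w = (w + xs[i]) % g; loops.append(w)
def z3_wilson_loops_py (link_config : List Int) (group_order : Int) : List Int :=
  (PySem.List.pyRange 1 ((link_config.length : Int) + 1) 1).foldl
    (fun loops k =>
      loops ++ [(PySem.List.pyRange 0 k 1).foldl
        (fun w i => PySem.Int.mod (w + PySem.List.pyGetD link_config i 0) group_order) 0])
    []

-- ===== PORT B =====
-- one pass over the list carrying the running value w
def pvAltGo (g : Int) (w : Int) : List Int → List Int
  | [] => []
  | u :: t =>
    let w' := PySem.Int.mod (w + u) g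
    w' :: pvAltGo g w' t

def z3_wilson_loops_py_alt (link_config : List Int) (group_order : Int) : List Int :=
  pvAltGo group_order 0 link_config

-- ===== PRECONDITION & SPEC =====
-- Pre_ excludes exactly the inputs on which Python A raises ZeroDivisionError:
-- a nonempty link_config with group_order = 0 (the '%' in the inner loop).
def Pre_z3_wilson_loops_py (link_config : List Int) (group_order : Int) : Prop :=
  link_config = [] ∨ group_order ≠ 0
instance (link_config : List Int) (group_order : Int) : Decidable (Pre_z3_wilson_loops_py link_config group_order) := by unfold Pre_z3_wilson_loops_py; infer_instance

def pvWitness_z3_wilson_loops_py : List Int × Int := ([1, 2, 2], 3)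

def Spec_z3_wilson_loops_py (link_config : List Int) (group_order : Int) (out : List Int) : Prop := out = z3_wilson_loops_py_alt link_config group_order
instance (link_config : List Int) (group_order : Int) (out : List Int) : Decidable (Spec_z3_wilson_loops_py link_config group_order out) := by unfold Spec_z3_wilson_loops_py; infer_instance

-- ===== CLAIM (what is proved, stated in full; the proofs are below) =====
def Claim_equal_z3_wilson_loops_py : Prop := ∀ (link_config : List Int) (group_order : Int), Dom_z3_wilson_loops_py link_config group_order → Pre_z3_wilson_loops_py link_config group_order → Spec_z3_wilson_loops_py link_config group_order (z3_wilson_loops_py link_config group_order)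

-- ===== LEMMAS AND PROOFS =====

-- A's k-th inner loop is a fold over the prefix take k of the list.
theorem pvInner_eq_take (xs : List Int) (g : Int) (n : Nat) (hn : n < xs.length) :
    (PySem.List.pyRange 0 (1 + (n : Int)) 1).foldl
      (fun w i => PySem.Int.mod (w + PySem.List.pyGetD xs i 0) g) 0
    = (xs.take (n + 1)).foldl (fun w u => PySem.Int.mod (w + u) g) 0 := by
  have hlen : ((xs.take (n + 1)).length : Int) = 1 + (n : Int) := by
    simp [List.length_take]; omega
  rw [← hlen, ← PySem.List.foldl_pyRange_zero_pyGetD' (xs.take (n + 1)) 0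
        (fun w u => PySem.Int.mod (w + u) g) 0]
  apply PySem.List.foldl_congr_mem
  intro acc i hi
  rw [PySem.List.mem_pyRange_one] at hi
  have h1 : (0 : Int) ≤ i := hi.1
  have h2 : i < ((xs.take (n + 1)).length : Int) := hi.2
  have h2' : i < (xs.length : Int) := by
    simp [List.length_take] at h2 ⊢; omega
  obtain ⟨m, rfl⟩ := Int.eq_ofNat_of_zero_le h1
  have hm : m < n + 1 := by
    simp [List.length_take] at h2
    omega
  simp only [PySem.List.pyGetD_natCast]
  congr 1
  rw [List.getD_eq_getElem?_getD, List.getD_eq_getElem?_getD, List.getElem?_take_of_lt hm]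

-- B's pass lists the folds over all prefixes, for any starting accumulator.
theorem pvAltGo_eq_map (g : Int) (xs : List Int) (w : Int) :
    pvAltGo g w xs
    = (List.range xs.length).map
        (fun n => (xs.take (n + 1)).foldl (fun a u => PySem.Int.mod (a + u) g) w) := by
  induction xs generalizing w with
  | nil => simp [pvAltGo]
  | cons u t ih =>
    simp only [pvAltGo, List.length_cons, List.range_succ_eq_map, List.map_cons,
      List.map_map, ih]
    refine List.cons_eq_cons.mpr ⟨by simp, ?_⟩
    apply List.map_congr_left
    intro n _
    simp [List.take_succ_cons, List.foldl_cons]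

theorem pvMain (xs : List Int) (g : Int) :
    z3_wilson_loops_py xs g = z3_wilson_loops_py_alt xs g := by
  unfold z3_wilson_loops_py z3_wilson_loops_py_alt
  rw [PySem.List.foldl_append_singleton_eq_map, List.nil_append,
      PySem.List.pyRange_one, pvAltGo_eq_map]
  have hcast : ((xs.length : Int) + 1 - 1).toNat = xs.length := by omega
  rw [hcast, List.map_map]
  apply List.map_congr_left
  intro n hn
  rw [List.mem_range] at hn
  simpa using pvInner_eq_take xs g n hn

-- ===== VERDICT (by name: the statement is the Claim_ definition above) =====
theorem z3_wilson_loops_py_spec : Claim_equal_z3_wilson_loops_py := by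
  intro xs g _ _
  unfold Spec_z3_wilson_loops_py
  exact pvMain xs g
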